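-- pv_equiv track=rewrite | github.com/Elizabethyonas/A2SV-progress | On-boarding/leetcode/number-of-ways-to-select-buildings.py | numberOfWays
-- ===== SOURCE A (Python) =====
-- def numberOfWays(s: str) -> int:
--     prefix_0 = [0] * len(s)
--     prefix_1 = [0] * len(s)
--     res = 0
--     for i in range(len(s)):
--         if s[i] == "0" :
--             prefix_0[i] += 1
--     for i in range(len(s)):
--         if s[i] == "1" :
--             prefix_1[i] += 1
--     for i in range(1,len(prefix_0)):
--         prefix_0[i] += prefix_0[i - 1]
--     for i in range(1,len(prefix_1)):
--         prefix_1[i] += prefix_1[i - 1]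
--     for i in range(1, len(s) - 1):
--         if s[i] == '0':
--             res += prefix_1[i-1] * (prefix_1[-1] - prefix_1[i])
--         else:
--             res += prefix_0[i-1] * (prefix_0[-1] - prefix_0[i])
--
--     return res
-- ===== SOURCE B (Python) =====
-- def numberOfWays(s: str) -> int:
--     # One pass with running counters instead of building four prefix-sum arrays.
--     total0 = s.count("0")
--     total1 = s.count("1")
--     res = 0
--     left0 = 0
--     left1 = 0
--     for c in s:
--         if c == "0":
--             res += left1 * (total1 - left1)
--             left0 += 1
--         else:
--             right0 = total0 - left0
--             res += left0 * right0
--             if c == "1":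
--                 left1 += 1
--     return res
-- ===== Notes on version B (the rewrite author's own statement) =====
-- stated objective: simpler
-- what changed: B replaces A's five passes (two indicator arrays, two in-place prefix-sum passes, and an interior loop indexing into them) by a single forward pass over the characters that maintains running left0/left1 counters against precomputed totals.
import Mathlib
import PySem

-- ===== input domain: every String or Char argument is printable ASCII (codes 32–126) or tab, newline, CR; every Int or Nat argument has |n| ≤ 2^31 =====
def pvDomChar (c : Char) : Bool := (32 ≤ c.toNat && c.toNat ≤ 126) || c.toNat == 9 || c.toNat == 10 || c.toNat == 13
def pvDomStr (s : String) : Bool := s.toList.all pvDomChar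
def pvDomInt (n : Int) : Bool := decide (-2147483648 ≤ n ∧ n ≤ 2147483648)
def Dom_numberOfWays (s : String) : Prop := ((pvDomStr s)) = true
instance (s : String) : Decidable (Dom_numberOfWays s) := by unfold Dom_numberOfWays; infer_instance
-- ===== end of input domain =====

-- B replaces A's four prefix-array passes by one pass with running zero/one counters (simpler; no asymptotic change).

-- ===== PORT A =====
-- Literal port of A: two indicator arrays, two in-place prefix-sum passes, then a loop over
-- the interior indices.  All indices i come from range(...) and are in range, so the total
-- forms pyGetD / pySetD are exact here; prefix_1[-1] is pyGetD arr (-1).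
def numberOfWays (s : String) : Int :=
  let cs := s.toList
  let n : Int := (cs.length : Int)
  let prefix0 :=
    (PySem.List.pyRange 0 n 1).foldl
      (fun arr i =>
        if PySem.List.pyGetD cs i ' ' = '0'
        then PySem.List.pySetD arr i (PySem.List.pyGetD arr i 0 + 1) else arr)
      (List.replicate cs.length (0 : Int))
  let prefix1 :=
    (PySem.List.pyRange 0 n 1).foldl
      (fun arr i =>
        if PySem.List.pyGetD cs i ' ' = '1'
        then PySem.List.pySetD arr i (PySem.List.pyGetD arr i 0 + 1) else arr)
      (List.replicate cs.length (0 : Int))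
  let prefix0 :=
    (PySem.List.pyRange 1 (prefix0.length : Int) 1).foldl
      (fun arr i => PySem.List.pySetD arr i (PySem.List.pyGetD arr i 0 + PySem.List.pyGetD arr (i - 1) 0))
      prefix0
  let prefix1 :=
    (PySem.List.pyRange 1 (prefix1.length : Int) 1).foldl
      (fun arr i => PySem.List.pySetD arr i (PySem.List.pyGetD arr i 0 + PySem.List.pyGetD arr (i - 1) 0))
      prefix1
  let res :=
    (PySem.List.pyRange 1 (n - 1) 1).foldl
      (fun res i =>
        if PySem.List.pyGetD cs i ' ' = '0'
        then res + PySem.List.pyGetD prefix1 (i - 1) 0 *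
               (PySem.List.pyGetD prefix1 (-1) 0 - PySem.List.pyGetD prefix1 i 0)
        else res + PySem.List.pyGetD prefix0 (i - 1) 0 *
               (PySem.List.pyGetD prefix0 (-1) 0 - PySem.List.pyGetD prefix0 i 0))
      0
  res

-- ===== PORT B =====
-- Literal port of B (Source B): totals via s.count, then one fold over the characters with
-- running counters (res, left0, left1).
def numberOfWays_alt (s : String) : Int :=
  let total0 : Int := (PySem.Str.count s "0" : Int)
  let total1 : Int := (PySem.Str.count s "1" : Int)
  let st :=
    s.toList.foldl
      (fun (st : Int × Int × Int) c =>
        let res := st.1; let left0 := st.2.1; let left1 := st.2.2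
        if c = '0' then (res + left1 * (total1 - left1), left0 + 1, left1)
        else
          let right0 := total0 - left0
          if c = '1' then (res + left0 * right0, left0, left1 + 1)
          else (res + left0 * right0, left0, left1))
      (0, 0, 0)
  st.1

-- ===== PRECONDITION & SPEC =====
def Spec_numberOfWays (s : String) (out : Int) : Prop := out = numberOfWays_alt s
instance (s : String) (out : Int) : Decidable (Spec_numberOfWays s out) := by unfold Spec_numberOfWays; infer_instance

-- ===== CLAIM (what is proved, stated in full; the proofs are below) =====
def Claim_equal_numberOfWays : Prop := ∀ (s : String), Dom_numberOfWays s → Spec_numberOfWays s (numberOfWays s)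

-- ===== LEMMAS AND PROOFS =====

-- indicator of a single character
def pvInd (t c : Char) : Int := if c = t then 1 else 0

-- number of occurrences of t among the first m characters
def pvCnt (cs : List Char) (t : Char) (m : Nat) : Int := ((cs.take m).map (pvInd t)).sum

-- the contribution of index i (A counts it for interior i; it is 0 at the endpoints)
def pvT (cs : List Char) (i : Nat) : Int :=
  if cs.getD i ' ' = '0'
  then pvCnt cs '1' i * (pvCnt cs '1' cs.length - pvCnt cs '1' (i + 1))
  else pvCnt cs '0' i * (pvCnt cs '0' cs.length - pvCnt cs '0' (i + 1))

lemma pvCnt_succ (cs : List Char) (t : Char) (k : Nat) (hk : k < cs.length) :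
    pvCnt cs t (k + 1) = pvCnt cs t k + pvInd t cs[k] := by
  unfold pvCnt
  rw [List.map_take, List.map_take, List.take_add_one,
    List.getElem?_eq_getElem (by simpa using hk)]
  simp

-- loop 1/2: the indicator-building pass
lemma pvLoop1 (cs : List Char) (t : Char) (k : Nat) (hk : k ≤ cs.length) :
    (List.range k).foldl
      (fun arr i => if cs.getD i ' ' = t then arr.set i (arr.getD i 0 + 1) else arr)
      (List.replicate cs.length (0 : Int))
    = (cs.take k).map (pvInd t) ++ List.replicate (cs.length - k) 0 := by
  induction k with
  | zero => simp
  | succ k ih =>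
    rw [List.range_succ, List.foldl_append, ih (by omega)]
    have hk' : k < cs.length := by omega
    have hlen : ((cs.take k).map (pvInd t)).length = k := by simp [List.length_take]; omega
    have hrep : List.replicate (cs.length - k) (0:Int) = 0 :: List.replicate (cs.length - (k+1)) 0 := by
      rw [show cs.length - k = (cs.length - (k+1)) + 1 by omega, List.replicate_succ]
    have hget : ((cs.take k).map (pvInd t) ++ List.replicate (cs.length - k) (0:Int)).getD k 0 = 0 := by
      rw [List.getD, List.getElem?_append_right (by omega), hrep,
        show k - (List.map (pvInd t) (cs.take k)).length = 0 by omega]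
      rfl
    have hgetc : cs.getD k ' ' = cs[k] := List.getD_eq_getElem cs ' ' hk'
    have hset : ∀ v : Int, ((cs.take k).map (pvInd t) ++ List.replicate (cs.length - k) (0:Int)).set k v
        = (cs.take k).map (pvInd t) ++ v :: List.replicate (cs.length - (k+1)) 0 := by
      intro v
      rw [List.set_append, if_neg (by omega), hrep,
        show k - (List.map (pvInd t) (cs.take k)).length = 0 by omega]
      rfl
    have htake : cs.take (k+1) = cs.take k ++ [cs[k]] := by
      rw [List.take_add_one, List.getElem?_eq_getElem hk']
      rfl
    simp only [List.foldl_cons, List.foldl_nil, hget, hgetc, hset, htake, List.map_append]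
    by_cases hc : cs[k] = t
    · rw [if_pos hc]
      simp [pvInd, hc]
    · rw [if_neg hc]
      simp [pvInd, hc]
      exact hrep

-- convert A's Int-indexed indicator loop to the Nat-indexed one
lemma pvStageInd (cs : List Char) (t : Char) :
    (PySem.List.pyRange 0 (cs.length : Int) 1).foldl
      (fun arr i =>
        if PySem.List.pyGetD cs i ' ' = t
        then PySem.List.pySetD arr i (PySem.List.pyGetD arr i 0 + 1) else arr)
      (List.replicate cs.length (0 : Int))
    = (List.range cs.length).foldl
      (fun arr i => if cs.getD i ' ' = t then arr.set i (arr.getD i 0 + 1) else arr)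
      (List.replicate cs.length (0 : Int)) := by
  rw [PySem.List.pyRange_one]
  simp only [Int.sub_zero, Int.toNat_natCast, List.foldl_map, zero_add,
    PySem.List.pyGetD_natCast, PySem.List.pySetD_natCast]

-- loop 3/4: in-place prefix sums
lemma pvLoop2 (v : List Int) (m : Nat) (hm : m + 1 ≤ v.length) :
    (List.range m).foldl
      (fun arr k => arr.set (k + 1) (arr.getD (k + 1) 0 + arr.getD k 0)) v
    = (List.range (m + 1)).map (fun j => (v.take (j + 1)).sum) ++ v.drop (m + 1) := by
  induction m with
  | zero =>
    rcases v with _ | ⟨a, l⟩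
    · simp at hm
    · simp
  | succ m ih =>
    rw [List.range_succ, List.foldl_append, ih (by omega)]
    have hm' : m + 1 < v.length := by omega
    set P := (List.range (m + 1)).map (fun j => (v.take (j + 1)).sum) with hP
    have hlenP : P.length = m + 1 := by simp [hP]
    have hgetP : (P ++ v.drop (m + 1)).getD m 0 = (v.take (m + 1)).sum := by
      rw [List.getD, List.getElem?_append_left (by omega)]
      simp [hP]
    have hgetv : (P ++ v.drop (m + 1)).getD (m + 1) 0 = v[m + 1] := by
      rw [List.getD, List.getElem?_append_right (by omega), hlenP]
      simp [List.getElem?_drop, List.getElem?_eq_getElem hm']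
    have hset : (P ++ v.drop (m + 1)).set (m + 1) (v[m + 1] + (v.take (m + 1)).sum)
        = P ++ (v[m + 1] + (v.take (m + 1)).sum) :: v.drop (m + 2) := by
      rw [List.set_append, if_neg (by omega), hlenP, Nat.sub_self]
      have : v.drop (m + 1) = v[m + 1] :: v.drop (m + 2) := by
        rw [List.drop_eq_getElem_cons hm']
      rw [this]
      rfl
    have htake : (v.take (m + 1 + 1)).sum = v[m + 1] + (v.take (m + 1)).sum := by
      rw [List.take_add_one, List.getElem?_eq_getElem hm']
      simp only [Option.toList_some, List.sum_append, List.sum_cons, List.sum_nil]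
      ring
    simp only [List.foldl_cons, List.foldl_nil, hgetP, hgetv, hset]
    rw [List.range_succ (n := m + 1), List.map_append, List.map_singleton, htake,
      List.append_assoc, List.singleton_append]

-- convert A's Int-indexed prefix-sum loop to the Nat-indexed one
lemma pvStagePre (v : List Int) :
    (PySem.List.pyRange 1 (v.length : Int) 1).foldl
      (fun arr i => PySem.List.pySetD arr i
        (PySem.List.pyGetD arr i 0 + PySem.List.pyGetD arr (i - 1) 0)) v
    = (List.range (v.length - 1)).foldl
      (fun arr k => arr.set (k + 1) (arr.getD (k + 1) 0 + arr.getD k 0)) v := by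
  rw [PySem.List.pyRange_one]
  have hn : ((v.length : Int) - 1).toNat = v.length - 1 := by omega
  rw [hn, List.foldl_map]
  congr 1
  funext arr k
  have h1 : (1 : Int) + (k : Nat) = ((k + 1 : Nat) : Int) := by push_cast; ring
  have h3 : (1 : Int) + (k : Nat) - 1 = ((k : Nat) : Int) := by ring
  rw [h3, h1, PySem.List.pySetD_natCast, PySem.List.pyGetD_natCast,
    PySem.List.pyGetD_natCast]

-- A's value as a sum over the interior indices
lemma pvA_eq (s : String) :
    numberOfWays s
      = ((List.range (s.toList.length - 2)).map (fun k => pvT s.toList (1 + k))).sum := by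
  simp only [numberOfWays]
  generalize s.toList = cs
  rcases eq_or_ne cs [] with hnil | hne
  · subst hnil
    have e0 : PySem.List.pyRange 0 0 1 = [] := PySem.List.pyRange_one_eq_nil (by omega)
    have e1 : PySem.List.pyRange 1 (-1) 1 = [] := PySem.List.pyRange_one_eq_nil (by omega)
    have e2 : PySem.List.pyRange 1 0 1 = [] := PySem.List.pyRange_one_eq_nil (by omega)
    simp [e0, e1, e2]
  · have hn1 : 1 ≤ cs.length := by
      rcases cs with _ | _
      · simp at hne
      · simp
    rw [pvStageInd, pvStageInd, pvLoop1 _ _ _ le_rfl, pvLoop1 _ _ _ le_rfl]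
    simp only [List.take_length, Nat.sub_self, List.replicate_zero, List.append_nil]
    rw [pvStagePre, pvStagePre,
      pvLoop2 (cs.map (pvInd '0')) ((cs.map (pvInd '0')).length - 1)
        (by simp only [List.length_map]; omega),
      pvLoop2 (cs.map (pvInd '1')) ((cs.map (pvInd '1')).length - 1)
        (by simp only [List.length_map]; omega)]
    have hd0 : (List.map (pvInd '0') cs).drop cs.length = [] :=
      List.drop_eq_nil_of_le (by simp)
    have hd1 : (List.map (pvInd '1') cs).drop cs.length = [] :=
      List.drop_eq_nil_of_le (by simp)
    simp only [List.length_map, show cs.length - 1 + 1 = cs.length by omega,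
      hd0, hd1, List.append_nil]
    rw [PySem.List.pyRange_one,
      show ((cs.length : Int) - 1 - 1).toNat = cs.length - 2 by omega,
      List.foldl_map]
    set f0 : Nat → Int := fun j => ((cs.map (pvInd '0')).take (j + 1)).sum with hf0
    set f1 : Nat → Int := fun j => ((cs.map (pvInd '1')).take (j + 1)).sum with hf1
    set P0 := (List.range cs.length).map f0 with hP0
    set P1 := (List.range cs.length).map f1 with hP1
    have hb : (fun (res : Int) (k : Nat) =>
        if PySem.List.pyGetD cs (1 + (k : Int)) ' ' = '0'
        then res + PySem.List.pyGetD P1 (1 + (k : Int) - 1) 0 *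
               (PySem.List.pyGetD P1 (-1) 0 - PySem.List.pyGetD P1 (1 + (k : Int)) 0)
        else res + PySem.List.pyGetD P0 (1 + (k : Int) - 1) 0 *
               (PySem.List.pyGetD P0 (-1) 0 - PySem.List.pyGetD P0 (1 + (k : Int)) 0))
        = fun (res : Int) (k : Nat) => res +
          (if PySem.List.pyGetD cs (1 + (k : Int)) ' ' = '0'
           then PySem.List.pyGetD P1 (1 + (k : Int) - 1) 0 *
               (PySem.List.pyGetD P1 (-1) 0 - PySem.List.pyGetD P1 (1 + (k : Int)) 0)
           else PySem.List.pyGetD P0 (1 + (k : Int) - 1) 0 *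
               (PySem.List.pyGetD P0 (-1) 0 - PySem.List.pyGetD P0 (1 + (k : Int)) 0)) := by
      funext res k
      by_cases h : PySem.List.pyGetD cs (1 + (k : Int)) ' ' = '0' <;> simp [h]
    rw [hb, PySem.List.foldl_add, zero_add]
    refine congrArg List.sum (List.map_congr_left ?_)
    intro k hk
    rw [List.mem_range] at hk
    have hPne1 : P1 ≠ [] := by
      simp [hP1, List.range_eq_nil]
      omega
    have hPne0 : P0 ≠ [] := by
      simp [hP0, List.range_eq_nil]
      omega
    have h3 : (1 : Int) + (k : Nat) - 1 = ((k : Nat) : Int) := by ring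
    have h1 : (1 : Int) + (k : Nat) = ((1 + k : Nat) : Int) := by push_cast; ring
    rw [h3, h1, PySem.List.pyGetD_neg_one P1 0 hPne1, PySem.List.pyGetD_neg_one P0 0 hPne0]
    simp only [PySem.List.pyGetD_natCast]
    rw [List.getLast_eq_getElem, List.getLast_eq_getElem]
    have hlen1 : P1.length = cs.length := by simp [hP1]
    have hlen0 : P0.length = cs.length := by simp [hP0]
    have hgl1 : P1[P1.length - 1]'(by omega) = f1 (cs.length - 1) := by
      simp [hP1, List.getElem_map, List.getElem_range]
    have hgl0 : P0[P0.length - 1]'(by omega) = f0 (cs.length - 1) := by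
      simp [hP0, List.getElem_map, List.getElem_range]
    rw [hgl1, hgl0,
      PySem.List.getD_map_range f1 cs.length (1 + k) 0 (by omega),
      PySem.List.getD_map_range f0 cs.length (1 + k) 0 (by omega),
      PySem.List.getD_map_range f1 cs.length k 0 (by omega),
      PySem.List.getD_map_range f0 cs.length k 0 (by omega)]
    simp only [pvT, pvCnt, hf0, hf1, ← List.map_take,
      show cs.length - 1 + 1 = cs.length by omega,
      show 1 + k = k + 1 from Nat.add_comm 1 k]

-- single-character count is countP
lemma pvCountGo (c : Char) (fuel : Nat) : ∀ (l : List Char) (acc : Nat), l.length ≤ fuel →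
    PySem.Chars.count.go [c] fuel l acc = acc + l.countP (· == c) := by
  induction fuel with
  | zero =>
    intro l acc hl
    rw [Nat.le_zero, List.length_eq_zero_iff] at hl
    subst hl
    simp [PySem.Chars.count.go]
  | succ fuel ih =>
    intro l acc hl
    rcases l with _ | ⟨h, t⟩
    · simp [PySem.Chars.count.go]
    · rw [PySem.Chars.count.go]
      have hpre : List.isPrefixOf [c] (h :: t) = (c == h) := by
        simp [List.isPrefixOf]
      rw [hpre]
      by_cases hc : c = h
      · rw [if_pos (by simp [hc]), show [c].length = 1 from rfl, List.drop_one,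
          List.tail_cons, ih t (acc + 1) (by simpa using hl)]
        simp [hc.symm]
        omega
      · rw [if_neg (by simp [hc]), ih t acc (by simpa using hl)]
        simp [beq_iff_eq, Ne.symm hc]
  
lemma pvCount_single (cs : List Char) (c : Char) :
    PySem.Chars.count cs [c] = cs.countP (· == c) := by
  rw [PySem.Chars.count]
  simp only [List.isEmpty_cons, if_neg Bool.false_ne_true]
  exact (pvCountGo c cs.length cs 0 le_rfl).trans (by omega)

-- total counts
lemma pvCnt_full (cs : List Char) (t : Char) :
    pvCnt cs t cs.length = (cs.countP (· == t) : Int) := by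
  unfold pvCnt
  rw [List.take_length]
  have h : (pvInd t) = fun c => if (c == t) = true then (1 : Int) else 0 := by
    funext c
    simp [pvInd]
  rw [h, PySem.List.sum_map_ite_one_zero]

-- B's loop invariant: after k characters the state is (partial sum, zeros seen, ones seen)
lemma pvLoopB (cs : List Char) (k : Nat) (hk : k ≤ cs.length) :
    (cs.take k).foldl
      (fun (st : Int × Int × Int) c =>
        if c = '0' then (st.1 + st.2.2 * (pvCnt cs '1' cs.length - st.2.2), st.2.1 + 1, st.2.2)
        else
          if c = '1' then (st.1 + st.2.1 * (pvCnt cs '0' cs.length - st.2.1), st.2.1, st.2.2 + 1)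
          else (st.1 + st.2.1 * (pvCnt cs '0' cs.length - st.2.1), st.2.1, st.2.2))
      (0, 0, 0)
    = (((List.range k).map (pvT cs)).sum, pvCnt cs '0' k, pvCnt cs '1' k) := by
  induction k with
  | zero => simp [pvCnt]
  | succ k ih =>
    have hk' : k < cs.length := by omega
    rw [List.take_add_one, List.getElem?_eq_getElem hk', Option.toList_some,
      List.foldl_append, ih (by omega), List.foldl_cons, List.foldl_nil]
    have hgetc : cs[k]? = some cs[k] := List.getElem?_eq_getElem hk'
    rw [List.range_succ, List.map_append, List.sum_append, List.map_singleton,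
      List.sum_cons, List.sum_nil, pvCnt_succ cs '0' k hk', pvCnt_succ cs '1' k hk']
    by_cases h0 : cs[k] = '0'
    · rw [if_pos h0]
      simp [pvT, hgetc, h0, pvInd, pvCnt_succ cs '1' k hk']
    · rw [if_neg h0]
      by_cases h1 : cs[k] = '1'
      · rw [if_pos h1]
        simp [pvT, hgetc, h1, pvInd, pvCnt_succ cs '0' k hk']
      · rw [if_neg h1]
        simp [pvT, hgetc, h0, h1, pvInd, pvCnt_succ cs '0' k hk']

-- B's value as the sum of all contributions
lemma pvB_eq (s : String) :
    numberOfWays_alt s = ((List.range s.toList.length).map (pvT s.toList)).sum := by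
  simp only [numberOfWays_alt]
  rw [PySem.Str.count_eq, PySem.Str.count_eq, show ("0" : String).toList = ['0'] from rfl,
    show ("1" : String).toList = ['1'] from rfl, pvCount_single, pvCount_single]
  rw [← pvCnt_full, ← pvCnt_full]
  generalize s.toList = cs
  have h := pvLoopB cs cs.length le_rfl
  rw [List.take_length] at h
  rw [h]

lemma pvT_zero (cs : List Char) : pvT cs 0 = 0 := by
  simp [pvT, pvCnt]
lemma pvT_last (cs : List Char) (n : Nat) (hn : cs.length = n + 1) : pvT cs n = 0 := by
  simp [pvT, hn]

-- ===== VERDICT (by name: the statement is the Claim_ definition above) =====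
theorem numberOfWays_spec : Claim_equal_numberOfWays := by
  intro s _
  show numberOfWays s = numberOfWays_alt s
  rw [pvA_eq, pvB_eq]
  have hsw : ∀ k, pvT s.toList (1 + k) = pvT s.toList (k + 1) := fun k => by rw [Nat.add_comm]
  rcases hn : s.toList.length with _ | n
  · simp
  · rcases n with _ | m
    · simp [pvT_zero]
    · rw [show m + 1 + 1 - 2 = m by omega, List.range_succ, List.range_succ_eq_map]
      simp only [List.map_append, List.map_cons, List.map_map, List.sum_append,
        List.sum_cons, Function.comp_def, Nat.succ_eq_add_one, hsw]
      rw [pvT_zero, pvT_last s.toList (m + 1) hn]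
      simp
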